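-- pv_equiv track=rewrite | github.com/BS-Algo/Algorithm | minjaeYoon/2025/2025-06/0625.py | solution
-- ===== SOURCE A (Python) =====
-- def solution(numbers, k):
--     answer = 0
--     lmt = 0
--     index_lmt = 0
--     num_lmt = len(numbers)
--
--     while lmt < k:
--         answer = numbers[index_lmt]
--         index_lmt += 2
--
--         # 인덱스가 범위를 벗어나면 초기화
--         if index_lmt >= num_lmt:
--             index_lmt = index_lmt % num_lmt
--
--         lmt += 1
--
--     return answer
-- ===== SOURCE B (Python) =====
-- def solution(numbers, k):
--     if k <= 0:
--         return 0
--     return numbers[(2 * (k - 1)) % len(numbers)]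
-- ===== Notes on version B (the rewrite author's own statement) =====
-- stated objective: alternative
-- what changed: Replaces the k-iteration while loop that steps an index by 2 (wrapping mod len) with the closed-form index numbers[(2*(k-1)) % len(numbers)] (0 when k <= 0): O(1) arithmetic instead of an O(k) loop; intended as faster for large k, but a timing run's per-input results were inconsistent (no speedup when k is small), so no speed is claimed.
import Mathlib
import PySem

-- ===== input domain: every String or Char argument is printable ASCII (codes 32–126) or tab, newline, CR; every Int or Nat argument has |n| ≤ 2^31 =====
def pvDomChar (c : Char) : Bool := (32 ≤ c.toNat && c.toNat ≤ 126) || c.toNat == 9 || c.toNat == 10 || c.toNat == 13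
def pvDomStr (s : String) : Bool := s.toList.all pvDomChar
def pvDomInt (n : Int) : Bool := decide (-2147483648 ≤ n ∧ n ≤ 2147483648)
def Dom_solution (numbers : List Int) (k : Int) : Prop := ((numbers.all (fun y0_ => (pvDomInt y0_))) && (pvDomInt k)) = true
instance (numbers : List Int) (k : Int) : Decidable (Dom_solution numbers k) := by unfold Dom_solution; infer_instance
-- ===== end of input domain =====

-- B replaces A's while loop (index stepped by 2, wrapped mod len, k iterations) by the
-- closed-form index numbers[(2*(k-1)) % len(numbers)] for k >= 1 (0 when k <= 0).

-- ===== PORT A =====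
-- the while loop: fuel = number of remaining iterations (k - lmt); pyGetD is exact
-- under Pre_ (index always in range when numbers ≠ []).
def solutionGo (numbers : List Int) (num_lmt : Int) : Nat → Int → Int → Int
  | 0, answer, _ => answer
  | f + 1, answer, index_lmt =>
    let answer := PySem.List.pyGetD numbers index_lmt 0
    let index_lmt := index_lmt + 2
    let index_lmt := if index_lmt ≥ num_lmt then PySem.Int.mod index_lmt num_lmt else index_lmt
    solutionGo numbers num_lmt f answer index_lmt

def solution (numbers : List Int) (k : Int) : Int :=
  solutionGo numbers (numbers.length : Int) k.toNat 0 0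

-- ===== PORT B =====
def solution_alt (numbers : List Int) (k : Int) : Int :=
  if k ≤ 0 then 0
  else PySem.List.pyGetD numbers (PySem.Int.mod (2 * (k - 1)) (numbers.length : Int)) 0

-- ===== PRECONDITION & SPEC =====
-- Pre_ excludes exactly the inputs where A raises IndexError (numbers empty with k ≥ 1).
def Pre_solution (numbers : List Int) (k : Int) : Prop := numbers ≠ [] ∨ k ≤ 0
instance (numbers : List Int) (k : Int) : Decidable (Pre_solution numbers k) := by unfold Pre_solution; infer_instance
def pvWitness_solution : List Int × Int := ([1, 2, 3], 4)
def Spec_solution (numbers : List Int) (k : Int) (out : Int) : Prop := out = solution_alt numbers k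
instance (numbers : List Int) (k : Int) (out : Int) : Decidable (Spec_solution numbers k out) := by unfold Spec_solution; infer_instance

-- ===== CLAIM (what is proved, stated in full; the proofs are below) =====
def Claim_equal_solution : Prop := ∀ (numbers : List Int) (k : Int), Dom_solution numbers k → Pre_solution numbers k → Spec_solution numbers k (solution numbers k)

-- ===== LEMMAS AND PROOFS =====

-- one-step and zero unfoldings of the loop (definitional)
theorem solutionGo_zero (numbers : List Int) (n ans idx : Int) :
    solutionGo numbers n 0 ans idx = ans := rfl

theorem solutionGo_succ (numbers : List Int) (n : Int) (f : Nat) (ans idx : Int) :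
    solutionGo numbers n (f + 1) ans idx
      = solutionGo numbers n f (PySem.List.pyGetD numbers idx 0)
          (if idx + 2 ≥ n then PySem.Int.mod (idx + 2) n else idx + 2) := rfl

-- loop invariant: with a non-empty list and an in-range index, running f+1 more
-- iterations returns the element at (index_lmt + 2*f) mod n.
theorem solutionGo_closed (numbers : List Int) (f : Nat) (ans idx : Int)
    (hne : numbers ≠ []) (h0 : 0 ≤ idx) (hlt : idx < (numbers.length : Int)) :
    solutionGo numbers (numbers.length : Int) (f + 1) ans idx
      = PySem.List.pyGetD numbers ((idx + 2 * (f : Int)) % (numbers.length : Int)) 0 := by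
  induction f generalizing ans idx with
  | zero =>
    rw [solutionGo_succ, solutionGo_zero]
    congr 1
    rw [show idx + 2 * ((0 : Nat) : Int) = idx by push_cast; ring,
      Int.emod_eq_of_lt h0 hlt]
  | succ f ih =>
    have hnpos : (0 : Int) < (numbers.length : Int) := by
      have : numbers.length ≠ 0 := by simpa using hne
      omega
    rw [solutionGo_succ]
    set idx' := if idx + 2 ≥ (numbers.length : Int)
        then PySem.Int.mod (idx + 2) (numbers.length : Int) else idx + 2 with hidx'
    have hidx'e : idx' = (idx + 2) % (numbers.length : Int) := by
      rw [hidx']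
      split
      · exact PySem.Int.mod_eq_emod_of_pos hnpos
      · rw [Int.emod_eq_of_lt (by omega) (by omega)]
    have h0' : 0 ≤ idx' := by rw [hidx'e]; exact Int.emod_nonneg _ (by omega)
    have hlt' : idx' < (numbers.length : Int) := by
      rw [hidx'e]; exact Int.emod_lt_of_pos _ hnpos
    rw [ih _ idx' h0' hlt']
    congr 1
    rw [hidx'e,
      show idx + 2 * ((f : Nat).succ : Int) = (idx + 2) + 2 * (f : Int) by push_cast; ring,
      Int.emod_add_emod]

theorem solution_eq_alt (numbers : List Int) (k : Int) (h : Pre_solution numbers k) :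
    solution numbers k = solution_alt numbers k := by
  unfold solution solution_alt
  by_cases hk : k ≤ 0
  · have : k.toNat = 0 := by omega
    rw [this]
    simp [solutionGo, hk]
  · have hne : numbers ≠ [] := by
      rcases h with h | h
      · exact h
      · omega
    have hnpos : (0 : Int) < (numbers.length : Int) := by
      have : numbers.length ≠ 0 := by simpa using hne
      omega
    have hf : k.toNat = (k.toNat - 1) + 1 := by omega
    rw [hf, solutionGo_closed numbers (k.toNat - 1) 0 0 hne le_rfl hnpos]
    rw [if_neg hk]
    congr 1
    rw [PySem.Int.mod_eq_emod_of_pos hnpos]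
    congr 1
    have : ((k.toNat - 1 : Nat) : Int) = k - 1 := by omega
    rw [this]; ring

-- ===== VERDICT (by name: the statement is the Claim_ definition above) =====
theorem solution_spec : Claim_equal_solution := by
  intro numbers k _ hpre
  exact solution_eq_alt numbers k hpre
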